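-- pv_equiv track=rewrite | github.com/wzk1997/pythonAdvanced | python0213/day2-3.py | fan
-- ===== SOURCE A (Python) =====
-- def fan(num):
--     a,b="*","*"
--     yield a
--     yield b
--     count=0
--     while count<=num:
--        a,b=b,a+b
--        yield b
--        count+=1
-- ===== SOURCE B (Python) =====
-- # B: each yield is computed INDEPENDENTLY from its index: the i-th yielded
-- # string is '*' repeated fib(i) times, with fib computed by recursive
-- # fast doubling -- no state (strings or a running pair) carried between yields.
-- def fan(num):
--     def fib(k):
--         # fast doubling: returns (fib(k), fib(k+1))
--         if k == 0:
--             return (0, 1)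
--         a, b = fib(k // 2)
--         c = a * (2 * b - a)
--         d = a * a + b * b
--         if k % 2 == 0:
--             return (c, d)
--         return (d, c + d)
--     total = 2 + max(num + 1, 0)
--     for i in range(1, total + 1):
--         yield '*' * fib(i)[0]
-- ===== Notes on version B (the rewrite author's own statement) =====
-- stated objective: alternative
-- what changed: B computes each yielded string independently from its position: the i-th yield is '*'*fib(i) with fib obtained by recursive fast doubling, instead of A's single stateful sweep that carries the two previous star strings and concatenates them; no state crosses yields in B.
import Mathlib
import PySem

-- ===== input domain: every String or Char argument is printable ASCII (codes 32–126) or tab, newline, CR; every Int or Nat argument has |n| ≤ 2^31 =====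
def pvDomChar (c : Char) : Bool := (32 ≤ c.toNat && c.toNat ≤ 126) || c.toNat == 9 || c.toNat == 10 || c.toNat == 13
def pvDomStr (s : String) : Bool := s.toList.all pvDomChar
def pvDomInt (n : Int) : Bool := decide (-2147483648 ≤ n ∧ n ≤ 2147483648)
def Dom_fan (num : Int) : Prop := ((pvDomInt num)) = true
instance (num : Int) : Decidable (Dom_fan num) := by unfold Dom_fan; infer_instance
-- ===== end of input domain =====

-- B computes each yielded string independently from its index ('*'*fib(i),
-- fib by recursive fast doubling), instead of A's stateful sweep that carries
-- and concatenates the two previous star strings. Generators are ported as the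
-- list of their yields; strings are carried as List Char (exact for Python
-- str concatenation/repetition) and wrapped with String.ofList at each yield.

-- ===== PORT A =====
-- the while loop: count runs 0..num, so (num+1).toNat iterations; state (a, b),
-- each step a,b = b, a+b (string concatenation) and yields the new b
def fanA_loop : Nat → List Char → List Char → List String
  | 0, _, _ => []
  | n + 1, a, b => String.ofList (a ++ b) :: fanA_loop n b (a ++ b)

def fan (num : Int) : List String :=
  String.ofList ['*'] :: String.ofList ['*'] :: fanA_loop (num + 1).toNat ['*'] ['*']

-- ===== PORT B =====
-- fast doubling: fibFD k = (fib(k), fib(k+1)); transliteration of Source B's fib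
def fibFD : Nat → Int × Int
  | 0 => (0, 1)
  | k + 1 =>
    let p := fibFD ((k + 1) / 2)
    let a := p.1
    let b := p.2
    let c := a * (2 * b - a)
    let d := a * a + b * b
    if (k + 1) % 2 == 0 then (c, d) else (d, c + d)
decreasing_by exact Nat.div_lt_self (Nat.succ_pos k) (by norm_num)

-- total = 2 + max(num+1, 0); for i in range(1, total+1): yield '*' * fib(i)[0]
def fan_alt (num : Int) : List String :=
  let total := 2 + max (num + 1) 0
  (PySem.List.pyRange 1 (total + 1) 1).map
    (fun i => String.ofList (List.replicate (fibFD i.toNat).1.toNat '*'))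

-- ===== PRECONDITION & SPEC =====
def Spec_fan (num : Int) (out : List String) : Prop := out = fan_alt num
instance (num : Int) (out : List String) : Decidable (Spec_fan num out) := by
  unfold Spec_fan; infer_instance

-- ===== CLAIM (what is proved, stated in full; the proofs are below) =====
def Claim_equal_fan : Prop := ∀ (num : Int), Dom_fan num → Spec_fan num (fan num)

-- ===== LEMMAS AND PROOFS =====
-- fast doubling computes Fibonacci
theorem fibFD_eq : ∀ (k : Nat), fibFD k = ((Nat.fib k : Int), (Nat.fib (k + 1) : Int)) := by
  intro k
  induction k using Nat.strong_induction_on with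
  | _ k ih =>
    match k with
    | 0 => simp [fibFD]
    | k + 1 =>
      have hlt : (k + 1) / 2 < k + 1 := Nat.div_lt_self (Nat.succ_pos k) (by norm_num)
      rw [fibFD]
      simp only [ih _ hlt]
      set m := (k + 1) / 2 with hm
      have hfle : Nat.fib m ≤ 2 * Nat.fib (m + 1) :=
        le_trans (Nat.fib_le_fib_succ) (by omega)
      have hc : (Nat.fib m : Int) * (2 * (Nat.fib (m + 1) : Int) - (Nat.fib m : Int))
          = (Nat.fib (2 * m) : Int) := by
        rw [Nat.fib_two_mul]; push_cast [hfle]; ring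
      have hd : (Nat.fib m : Int) * (Nat.fib m : Int)
          + (Nat.fib (m + 1) : Int) * (Nat.fib (m + 1) : Int)
          = (Nat.fib (2 * m + 1) : Int) := by
        rw [Nat.fib_two_mul_add_one]; push_cast; ring
      have hsum : (Nat.fib (2 * m) : Int) + (Nat.fib (2 * m + 1) : Int)
          = (Nat.fib (2 * m + 1 + 1) : Int) := by
        rw [show 2 * m + 1 + 1 = 2 * m + 2 from rfl, Nat.fib_add_two]; push_cast; ring
      rcases Nat.even_or_odd (k + 1) with he | ho
      · have hmod : (k + 1) % 2 = 0 := Nat.even_iff.mp he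
        have h2 : 2 * m = k + 1 := by omega
        rw [if_pos (by simp [hmod])]
        rw [hc, hd, h2]
      · have hmod : (k + 1) % 2 = 1 := Nat.odd_iff.mp ho
        have h2 : 2 * m + 1 = k + 1 := by omega
        rw [if_neg (by simp [hmod])]
        rw [hc, hd, hsum, h2]

-- A's loop starting from (fib(j+1), fib(j+2)) stars yields fib(j+3+i) stars at step i
theorem fanA_loop_eq (n : Nat) : ∀ (j : Nat),
    fanA_loop n (List.replicate (Nat.fib (j + 1)) '*') (List.replicate (Nat.fib (j + 2)) '*')
      = (List.range n).map (fun i => String.ofList (List.replicate (Nat.fib (j + 3 + i)) '*')) := by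
  induction n with
  | zero => intro j; rfl
  | succ n ih =>
    intro j
    have hcat : List.replicate (Nat.fib (j + 1)) '*' ++ List.replicate (Nat.fib (j + 2)) '*'
        = List.replicate (Nat.fib (j + 3)) '*' := by
      rw [← List.replicate_add]
      congr 1
      have h1 : Nat.fib (j + 3) = Nat.fib (j + 1) + Nat.fib (j + 2) := Nat.fib_add_two (n := j + 1)
      omega
    rw [fanA_loop, hcat]
    have hih := ih (j + 1)
    rw [show j + 1 + 1 = j + 2 from rfl] at hih
    rw [hih, List.range_succ_eq_map, List.map_cons, List.map_map]
    congr 1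
    apply List.map_congr_left
    intro i _
    simp only [Function.comp_apply]
    have h : j + 1 + 3 + i = j + 3 + Nat.succ i := by omega
    rw [h]

-- ===== VERDICT =====
theorem fan_spec : Claim_equal_fan := by
  intro num _
  unfold Spec_fan fan
  have hB : fan_alt num = (PySem.List.pyRange 1 (2 + max (num + 1) 0 + 1) 1).map
      (fun i => String.ofList (List.replicate (fibFD i.toNat).1.toNat '*')) := rfl
  rw [hB, PySem.List.pyRange_one_cons (by omega : (1 : Int) < 2 + max (num + 1) 0 + 1),
    PySem.List.pyRange_one_cons (by omega : (1 : Int) + 1 < 2 + max (num + 1) 0 + 1),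
    PySem.List.pyRange_one, List.map_cons, List.map_cons, List.map_map]
  congr 1
  · norm_num [fibFD_eq]
  congr 1
  · norm_num [fibFD_eq]
    decide
  rw [show fanA_loop (num + 1).toNat ['*'] ['*']
      = fanA_loop (num + 1).toNat (List.replicate (Nat.fib 1) '*')
          (List.replicate (Nat.fib 2) '*') from rfl,
    fanA_loop_eq (num + 1).toNat 0,
    show ((2 : Int) + max (num + 1) 0 + 1 - (1 + 1 + 1)).toNat = (num + 1).toNat from by omega]
  apply List.map_congr_left
  intro i _
  simp only [Function.comp_apply]
  have h1 : ((1 : Int) + 1 + 1 + (i : Nat)).toNat = i + 3 := by omega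
  rw [h1, fibFD_eq, show 0 + 3 + i = i + 3 from by omega]
  simp
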